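-- pv_equiv track=rewrite | github.com/zjunlp/RAP | retrieval/retrieve_utils.py | align_span_to_tokens
-- ===== SOURCE A (Python) =====
-- from typing import Dict, List, Optional, Set, Tuple, Union
--
-- def align_span_to_tokens(span: str, tokens: List[str]) -> Tuple[int, int]:
--     # Eg align("John R. Allen, Jr.", ['John', 'R.', 'Allen', ',', 'Jr.'])
--     char_word_map = {}
--     num_chars = 0
--     for i, w in enumerate(tokens):
--         for _ in w:
--             char_word_map[num_chars] = i
--             num_chars += 1
--     char_word_map[num_chars] = len(tokens)
--
--     query = span.replace(" ", "")
--     text = "".join(tokens)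
--     assert query in text
--     i = text.find(query)
--     start = char_word_map[i]
--     end = char_word_map[i + len(query) - 1]
--     assert 0 <= start <= end
--     return list(range(start, end + 1))
-- ===== SOURCE B (Python) =====
-- from typing import List, Tuple
--
-- def align_span_to_tokens(span: str, tokens: List[str]) -> Tuple[int, int]:
--     # Prefix-offset table instead of a per-character dict: token index of a
--     # char position c is the number of offsets <= c, minus one.
--     query = span.replace(" ", "")
--     text = "".join(tokens)
--     assert query in text
--     i = text.find(query)
--     offsets = [0]
--     for w in tokens:
--         offsets.append(offsets[-1] + len(w))
--     def token_at(c):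
--         return sum(1 for o in offsets if o <= c) - 1
--     start = token_at(i)
--     end = token_at(i + len(query) - 1)
--     assert 0 <= start <= end
--     return list(range(start, end + 1))
-- ===== Notes on version B (the rewrite author's own statement) =====
-- stated objective: alternative
-- what changed: Replaces the per-character dict char_word_map with a per-token prefix-offset table; a char position's token index is computed as the number of offsets <= it, minus one.
-- outside the precondition, e.g. on align_span_to_tokens('x', ['ab']): A raises AssertionError, B raises AssertionError; on align_span_to_tokens('', ['ab']): A raises KeyError, B raises AssertionError
import Mathlib
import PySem

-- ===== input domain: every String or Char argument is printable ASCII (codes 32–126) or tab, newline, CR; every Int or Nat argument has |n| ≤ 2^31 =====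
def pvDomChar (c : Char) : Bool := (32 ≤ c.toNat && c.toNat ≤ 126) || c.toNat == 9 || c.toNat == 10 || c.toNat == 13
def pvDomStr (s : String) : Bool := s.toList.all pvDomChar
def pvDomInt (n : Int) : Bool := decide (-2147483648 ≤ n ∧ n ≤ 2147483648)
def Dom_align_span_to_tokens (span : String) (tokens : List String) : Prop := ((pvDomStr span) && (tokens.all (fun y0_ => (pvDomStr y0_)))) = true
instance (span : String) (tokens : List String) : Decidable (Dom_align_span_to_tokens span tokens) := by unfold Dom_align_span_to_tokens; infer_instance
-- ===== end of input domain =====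

-- B replaces A's per-character dict with a per-token prefix-offset table (token of a
-- char position = number of offsets ≤ it, minus one); equal return value on Pre_.

-- ===== PORT A =====
-- the enumerate/char double loop building char_word_map and num_chars
def pvCharMapState (tokens : List String) : PySem.Dict Int Int × Int :=
  (PySem.List.enumerate tokens 0).foldl
    (fun (p : PySem.Dict Int Int × Int) iw =>
      iw.2.toList.foldl (fun (q : PySem.Dict Int Int × Int) _ => (q.1.insert q.2 iw.1, q.2 + 1)) p)
    (PySem.Dict.empty, 0)

def align_span_to_tokens (span : String) (tokens : List String) : List Int :=
  let st := pvCharMapState tokens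
  let cmap := st.1.insert st.2 (tokens.length : Int)
  let query := PySem.Str.replace span " " ""
  let text := PySem.Str.join "" tokens
  if PySem.Str.isIn query text = true then
    let i := PySem.Str.find text query
    match cmap.get? i, cmap.get? (i + PySem.Str.len query - 1) with   -- KeyError = none
    | some start, some stop =>
        if 0 ≤ start ∧ start ≤ stop then PySem.List.pyRange start (stop + 1) 1 else []
    | _, _ => []
  else []

-- ===== PORT B =====
def pvOffsets (tokens : List String) : List Int :=
  tokens.foldl (fun acc w => acc ++ [PySem.List.pyGetD acc (-1) 0 + PySem.Str.len w]) [0]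

def pvTokenAt (offsets : List Int) (c : Int) : Int :=
  offsets.foldl (fun s o => if o ≤ c then s + 1 else s) 0 - 1

def align_span_to_tokens_alt (span : String) (tokens : List String) : List Int :=
  let query := PySem.Str.replace span " " ""
  let text := PySem.Str.join "" tokens
  if PySem.Str.isIn query text = true then
    let i := PySem.Str.find text query
    let offsets := pvOffsets tokens
    let start := pvTokenAt offsets i
    let stop := pvTokenAt offsets (i + PySem.Str.len query - 1)
    if 0 ≤ start ∧ start ≤ stop then PySem.List.pyRange start (stop + 1) 1 else []
  else []

-- ===== PRECONDITION & SPEC =====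
-- Pre_ excludes exactly the inputs where A raises: query not a substring of the joined
-- tokens (assert fails) and the empty query (KeyError on index -1).
def Pre_align_span_to_tokens (span : String) (tokens : List String) : Prop :=
  PySem.Str.replace span " " "" ≠ "" ∧
  PySem.Str.isIn (PySem.Str.replace span " " "") (PySem.Str.join "" tokens) = true
instance (span : String) (tokens : List String) : Decidable (Pre_align_span_to_tokens span tokens) := by
  unfold Pre_align_span_to_tokens; infer_instance

def pvWitness_align_span_to_tokens : String × List String :=
  ("Allen ,", ["John", "R.", "Allen", ",", "Jr."])

def Spec_align_span_to_tokens (span : String) (tokens : List String) (out : List Int) : Prop := out = align_span_to_tokens_alt span tokens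
instance (span : String) (tokens : List String) (out : List Int) : Decidable (Spec_align_span_to_tokens span tokens out) := by unfold Spec_align_span_to_tokens; infer_instance

-- ===== CLAIM (what is proved, stated in full; the proofs are below) =====
def Claim_equal_align_span_to_tokens : Prop := ∀ (span : String) (tokens : List String), Dom_align_span_to_tokens span tokens → Pre_align_span_to_tokens span tokens → Spec_align_span_to_tokens span tokens (align_span_to_tokens span tokens)

-- ===== LEMMAS AND PROOFS =====

-- total number of characters over all tokens
def pvTotal (tokens : List String) : Nat := (tokens.map String.length).sum

-- joining with "" flattens
lemma pv_join_empty_toList (tokens : List String) :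
    (PySem.Str.join "" tokens).toList = (tokens.map String.toList).flatten := by
  rw [PySem.Str.toList_join]
  show PySem.Chars.join [] (tokens.map String.toList) = _
  induction tokens with
  | nil => simp [PySem.Chars.join_nil]
  | cons a l ih =>
    cases l with
    | nil => simp [PySem.Chars.join_singleton]
    | cons b m =>
      simp only [List.map_cons, PySem.Chars.join_cons_cons] at *
      simp [ih]

-- the inner `for _ in w` loop: counter advances by len w …
lemma pv_inner_snd (cs : List Char) (d : PySem.Dict Int Int) (n i : Int) :
    (cs.foldl (fun (q : PySem.Dict Int Int × Int) _ => (q.1.insert q.2 i, q.2 + 1)) (d, n)).2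
      = n + cs.length := by
  induction cs generalizing d n with
  | nil => simp
  | cons c cs ih =>
    rw [List.foldl_cons, ih, List.length_cons]
    push_cast
    ring

-- … and the dict gains exactly the keys n … n+len w-1, all mapped to i
lemma pv_inner_get (cs : List Char) (d : PySem.Dict Int Int) (n i c : Int) :
    (cs.foldl (fun (q : PySem.Dict Int Int × Int) _ => (q.1.insert q.2 i, q.2 + 1)) (d, n)).1.get? c
      = if n ≤ c ∧ c < n + cs.length then some i else d.get? c := by
  induction cs generalizing d n with
  | nil =>
    simp only [List.foldl_nil, List.length_nil, Nat.cast_zero, add_zero]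
    rw [if_neg (by omega)]
  | cons x cs ih =>
    simp only [List.foldl_cons, List.length_cons]
    rw [ih]
    by_cases hc : c = n
    · subst hc
      rw [if_neg (by omega), if_pos (by push_cast; omega), PySem.Dict.get?_insert_self]
    · rw [PySem.Dict.get?_insert_of_ne d i hc]
      by_cases h1 : n + 1 ≤ c ∧ c < n + 1 + (cs.length : Int)
      · rw [if_pos h1, if_pos (by push_cast; omega)]
      · rw [if_neg h1, if_neg (by push_cast; omega)]

-- countP form of B's token_at fold
lemma pv_tokenAt_eq (offsets : List Int) (c : Int) :
    pvTokenAt offsets c = (offsets.countP (fun o => decide (o ≤ c)) : Int) - 1 := by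
  unfold pvTokenAt
  rw [PySem.List.foldl_ite_add_one (fun o => o ≤ c) offsets 0]
  simp

-- the combined invariant, by induction from the right over tokens
lemma pv_invariant (tokens : List String) :
    PySem.List.pyGetD (pvOffsets tokens) (-1) 0 = (pvTotal tokens : Int) ∧
    (∀ o ∈ pvOffsets tokens, o ≤ (pvTotal tokens : Int)) ∧
    (pvOffsets tokens).length = tokens.length + 1 ∧
    (pvCharMapState tokens).2 = (pvTotal tokens : Int) ∧
    (∀ c : Int, 0 ≤ c → c < (pvTotal tokens : Int) →
      (pvCharMapState tokens).1.get? c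
        = some (((pvOffsets tokens).countP (fun o => decide (o ≤ c)) : Int) - 1)) := by
  induction tokens using List.reverseRecOn with
  | nil =>
    refine ⟨by simp [pvOffsets, pvTotal, PySem.List.pyGetD_neg_one], ?_, by simp [pvOffsets], by simp [pvCharMapState, pvTotal, PySem.List.enumerate_nil], ?_⟩
    · intro o ho; simp [pvOffsets] at ho; simp [ho, pvTotal]
    · intro c h0 hc; simp [pvTotal] at hc; omega
  | append_singleton ts w ih =>
    obtain ⟨ihLast, ihLe, ihLen, ihSnd, ihGet⟩ := ih
    have hoff : pvOffsets (ts ++ [w]) = pvOffsets ts ++ [(pvTotal ts : Int) + (w.length : Int)] := by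
      unfold pvOffsets
      rw [List.foldl_append]
      show (pvOffsets ts) ++ [PySem.List.pyGetD (pvOffsets ts) (-1) 0 + PySem.Str.len w] = _
      rw [ihLast, PySem.Str.len_eq]
      rfl
    have htot : (pvTotal (ts ++ [w]) : Int) = (pvTotal ts : Int) + (w.toList.length : Int) := by
      simp [pvTotal, String.length_toList]
    simp only [String.length_toList] at hoff htot
    have hstate : pvCharMapState (ts ++ [w])
        = w.toList.foldl (fun (q : PySem.Dict Int Int × Int) _ => (q.1.insert q.2 ((0 : Int) + ts.length), q.2 + 1)) (pvCharMapState ts) := by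
      unfold pvCharMapState
      rw [PySem.List.enumerate_append, List.foldl_append, PySem.List.enumerate_cons, PySem.List.enumerate_nil, List.foldl_cons, List.foldl_nil]
    refine ⟨?_, ?_, ?_, ?_, ?_⟩
    · rw [hoff, PySem.List.pyGetD_neg_one_append_singleton, htot]
    · intro o ho
      rw [hoff] at ho
      rw [htot]
      rcases List.mem_append.1 ho with h | h
      · have := ihLe o h; omega
      · simp at h; simp [h]
    · rw [hoff]; simp [ihLen]
    · rw [hstate]
      have := pv_inner_snd w.toList (pvCharMapState ts).1 (pvCharMapState ts).2 ((0 : Int) + ts.length)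
      rw [show ((pvCharMapState ts).1, (pvCharMapState ts).2) = pvCharMapState ts from rfl] at this
      rw [this, ihSnd, htot]
      simp [String.length_toList]
    · intro c h0 hc
      rw [hstate]
      have hget := pv_inner_get w.toList (pvCharMapState ts).1 (pvCharMapState ts).2 ((0 : Int) + ts.length) c
      rw [show ((pvCharMapState ts).1, (pvCharMapState ts).2) = pvCharMapState ts from rfl] at hget
      simp only [String.length_toList] at hget
      rw [hget, ihSnd, hoff, List.countP_append]
      rw [htot] at hc
      by_cases hmid : (pvTotal ts : Int) ≤ c
      · rw [if_pos ⟨hmid, by omega⟩]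
        have hall : (pvOffsets ts).countP (fun o => decide (o ≤ c)) = (pvOffsets ts).length := by
          apply List.countP_eq_length.2
          intro o ho
          exact decide_eq_true (le_trans (ihLe o ho) hmid)
        have hone : List.countP (fun o => decide (o ≤ c)) [(pvTotal ts : Int) + (w.length : Int)] = 0 := by
          simp; omega
        rw [hall, hone, ihLen]
        refine congrArg some ?_
        push_cast
        omega
      · rw [if_neg (by omega)]
        rw [ihGet c h0 (by omega)]
        have hone : List.countP (fun o => decide (o ≤ c)) [(pvTotal ts : Int) + (w.length : Int)] = 0 := by
          simp; omega
        rw [hone]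
        simp

-- ===== VERDICT (by name: the statement is the Claim_ definition above) =====
theorem align_span_to_tokens_spec : Claim_equal_align_span_to_tokens := by
  intro span tokens _ hpre
  obtain ⟨hq, hin⟩ := hpre
  unfold Spec_align_span_to_tokens align_span_to_tokens align_span_to_tokens_alt
  simp only [hin, if_pos]
  obtain ⟨ihLast, ihLe, ihLen, ihSnd, ihGet⟩ := pv_invariant tokens
  set q := PySem.Str.replace span " " "" with hqdef
  set text := PySem.Str.join "" tokens with htext
  set i := PySem.Str.find text q with hi
  -- basic bounds on i and len q
  have hqlen : 1 ≤ (q.toList.length : Int) := by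
    rcases q.toList.eq_nil_or_concat with h | ⟨l, a, h⟩
    · exfalso; apply hq; simpa using h
    · rw [h]; simp
  have hinf : q.toList <:+: text.toList := (PySem.Str.isIn_iff_infix q text).1 hin
  have hipos : 0 ≤ i := (PySem.Str.find_nonneg_iff text q).2 hinf
  have htotlen : (text.toList.length : Int) = (pvTotal tokens : Int) := by
    rw [htext, pv_join_empty_toList, List.length_flatten, pvTotal]
    congr 1
    rw [List.map_map]
    refine congrArg List.sum (List.map_congr_left ?_)
    intro s _
    simp [Function.comp, String.length_toList]
  have hup : i + (q.toList.length : Int) ≤ (pvTotal tokens : Int) := by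
    have hfind : PySem.Chars.find text.toList q.toList = i := by
      rw [hi, PySem.Str.find_eq]
    have hspec := PySem.Chars.find_spec (s := text.toList) (sub := q.toList) (by rw [hfind]; exact hipos)
    have hpref := hspec.1
    have := hpref.length_le
    rw [hfind] at this
    rw [List.length_drop] at this
    rw [← htotlen]
    omega
  have hlenq : PySem.Str.len q = (q.toList.length : Int) := PySem.Str.len_eq q
  -- both queried keys are strictly below the boundary key pvTotal
  have hk1 : i < (pvTotal tokens : Int) := by omega
  have hk2 : 0 ≤ i + PySem.Str.len q - 1 ∧ i + PySem.Str.len q - 1 < (pvTotal tokens : Int) := by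
    rw [hlenq]; omega
  have hget1 : ((pvCharMapState tokens).1.insert (pvCharMapState tokens).2 (tokens.length : Int)).get? i
      = some (((pvOffsets tokens).countP (fun o => decide (o ≤ i)) : Int) - 1) := by
    rw [ihSnd, PySem.Dict.get?_insert_of_ne _ _ (by omega)]
    exact ihGet i hipos hk1
  have hget2 : ((pvCharMapState tokens).1.insert (pvCharMapState tokens).2 (tokens.length : Int)).get? (i + PySem.Str.len q - 1)
      = some (((pvOffsets tokens).countP (fun o => decide (o ≤ i + PySem.Str.len q - 1)) : Int) - 1) := by
    rw [ihSnd, PySem.Dict.get?_insert_of_ne _ _ (by omega)]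
    exact ihGet _ hk2.1 hk2.2
  rw [hget1, hget2, pv_tokenAt_eq, pv_tokenAt_eq]
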